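-- pv_equiv track=rewrite | github.com/houryak/-A1-Sorting-algorithms-performance-divide-and-concur | main.py | distribute_chocolates_iterative
-- ===== SOURCE A (Python) =====
-- def distribute_chocolates_iterative(chocolates, students):
--     # creates an empty list to store the distributed chocolates
--     distributed_chocolates = []
--     '''Using the modulo operator, it assigns a chocolate from the chocolates list to
--     each student as iterates through the students list, making ensuring that
--     each chocolate is given out just once.'''
--     for i in range(len(students)):
--         distributed_chocolates.append(chocolates[i % len(chocolates)])
--     # return the list of distributed chocolates
--     return distributed_chocolates
-- ===== SOURCE B (Python) =====
-- def distribute_chocolates_iterative(chocolates, students):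
--     if not students:
--         return []
--     q, r = divmod(len(students), len(chocolates))
--     return chocolates * q + chocolates[:r]
-- ===== Notes on version B (the rewrite author's own statement) =====
-- stated objective: simpler
-- what changed: Replaced the per-student modulo-indexing append loop with block replication: divmod gives the number of whole copies and the remainder, and the result is chocolates * q plus a tail slice chocolates[:r].
import Mathlib
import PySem

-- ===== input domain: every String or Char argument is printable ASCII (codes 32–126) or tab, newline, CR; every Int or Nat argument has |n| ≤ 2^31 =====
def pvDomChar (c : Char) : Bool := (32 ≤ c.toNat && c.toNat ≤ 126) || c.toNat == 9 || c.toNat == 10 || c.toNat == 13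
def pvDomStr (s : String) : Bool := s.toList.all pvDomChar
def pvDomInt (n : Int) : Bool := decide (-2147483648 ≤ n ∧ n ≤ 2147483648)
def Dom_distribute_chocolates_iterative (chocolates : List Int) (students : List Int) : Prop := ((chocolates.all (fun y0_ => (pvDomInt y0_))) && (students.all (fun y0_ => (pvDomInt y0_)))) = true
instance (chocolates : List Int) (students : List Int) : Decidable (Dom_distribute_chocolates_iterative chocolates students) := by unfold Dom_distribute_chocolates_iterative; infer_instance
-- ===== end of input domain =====

-- B replaces A's per-student modulo-indexing append loop by block replication
-- (whole copies of chocolates plus a tail slice); return values agree on Pre_.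

-- ===== PORT A =====
-- for i in range(len(students)): distributed.append(chocolates[i % len(chocolates)])
-- (chocolates[i % len(chocolates)] raises IndexError/ZeroDivisionError only when
--  chocolates = [] and students ≠ []; that case is excluded by Pre_, so the
--  pyGetD default 0 is never used on admitted inputs)
def distribute_chocolates_iterative (chocolates : List Int) (students : List Int) : List Int :=
  (PySem.List.pyRange 0 (PySem.List.len students) 1).foldl
    (fun acc i =>
      acc ++ [PySem.List.pyGetD chocolates (PySem.Int.mod i (PySem.List.len chocolates)) 0])
    []

-- ===== PORT B =====
-- if not students: return []; q, r = divmod(len(students), len(chocolates));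
-- return chocolates * q + chocolates[:r]
def distribute_chocolates_iterative_alt (chocolates : List Int) (students : List Int) : List Int :=
  if students = [] then []
  else
    (List.replicate
        (PySem.Int.floordiv (PySem.List.len students) (PySem.List.len chocolates)).toNat
        chocolates).flatten ++
      PySem.List.slice chocolates none
        (some (PySem.Int.mod (PySem.List.len students) (PySem.List.len chocolates)))

-- ===== PRECONDITION & SPEC =====
-- Pre_ excludes exactly the inputs where A raises (ZeroDivisionError from
-- i % len(chocolates) when chocolates is empty but students is not).
def Pre_distribute_chocolates_iterative (chocolates : List Int) (students : List Int) : Prop :=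
  chocolates ≠ [] ∨ students = []
instance (chocolates : List Int) (students : List Int) : Decidable (Pre_distribute_chocolates_iterative chocolates students) := by unfold Pre_distribute_chocolates_iterative; infer_instance

def pvWitness_distribute_chocolates_iterative : List Int × List Int := ([1, 2, 3], [10, 20, 30, 40, 50])

def Spec_distribute_chocolates_iterative (chocolates : List Int) (students : List Int) (out : List Int) : Prop := out = distribute_chocolates_iterative_alt chocolates students
instance (chocolates : List Int) (students : List Int) (out : List Int) : Decidable (Spec_distribute_chocolates_iterative chocolates students out) := by unfold Spec_distribute_chocolates_iterative; infer_instance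

-- ===== CLAIM (what is proved, stated in full; the proofs are below) =====
def Claim_equal_distribute_chocolates_iterative : Prop := ∀ (chocolates : List Int) (students : List Int), Dom_distribute_chocolates_iterative chocolates students → Pre_distribute_chocolates_iterative chocolates students → Spec_distribute_chocolates_iterative chocolates students (distribute_chocolates_iterative chocolates students)

-- ===== LEMMAS AND PROOFS =====

-- A's loop only appends, so it is the map of the index function over the range.
theorem pv_foldl_append_map {α β : Type} (f : α → β) (l : List α) (init : List β) :
    l.foldl (fun acc x => acc ++ [f x]) init = init ++ l.map f := by
  induction l generalizing init with
  | nil => simp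
  | cons x xs ih => simp [List.foldl_cons, ih]

-- Arithmetic helpers for the inductive step of the cyclic identity.
theorem pv_succ_full (n m : Nat) (hm : 0 < m) (h : n % m = m - 1) :
    (n + 1) % m = 0 ∧ (n + 1) / m = n / m + 1 := by
  have e : m * (n / m) + n % m = n := Nat.div_add_mod n m
  have h' : n % m + 1 = m := by omega
  have hn1 : n + 1 = (n / m + 1) * m := by rw [Nat.succ_mul, Nat.mul_comm (n / m) m]; linarith
  exact ⟨by rw [hn1]; exact Nat.mul_mod_left _ _,
         by rw [hn1]; exact Nat.mul_div_cancel _ hm⟩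

theorem pv_succ_part (n m : Nat) (hm : 0 < m) (h : ¬ n % m = m - 1) :
    (n + 1) % m = n % m + 1 ∧ (n + 1) / m = n / m := by
  have hlt : n % m < m := Nat.mod_lt _ hm
  have hlt' : n % m + 1 < m := by omega
  have e : m * (n / m) + n % m = n := Nat.div_add_mod n m
  have hn1 : n + 1 = (n % m + 1) + n / m * m := by rw [Nat.mul_comm]; linarith
  refine ⟨?_, ?_⟩
  · rw [hn1, Nat.add_mul_mod_self_right, Nat.mod_eq_of_lt hlt']
  · rw [hn1, Nat.add_mul_div_right _ _ hm, Nat.div_eq_of_lt hlt', Nat.zero_add]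

-- Core identity: the cyclic index map over range n equals q whole copies plus a take of r.
theorem pv_cyclic_eq_blocks (choc : List Int) (hne : choc ≠ []) (n : Nat) :
    (List.range n).map (fun k => choc.getD (k % choc.length) 0) =
      (List.replicate (n / choc.length) choc).flatten ++ choc.take (n % choc.length) := by
  have hm : 0 < choc.length := List.length_pos_iff.mpr hne
  induction n with
  | zero => simp
  | succ n ih =>
    rw [List.range_succ, List.map_append, ih]
    by_cases h : n % choc.length = choc.length - 1
    · obtain ⟨h1, h2⟩ := pv_succ_full n choc.length hm h
      have hidx : choc.length - 1 < choc.length := by omega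
      have h3 : choc.take (n % choc.length) ++ [choc.getD (n % choc.length) 0] = choc := by
        rw [h, List.getD_eq_getElem choc 0 hidx, ← List.concat_eq_append,
          List.take_concat_get, Nat.sub_add_cancel hm, List.take_length]
      rw [h1, h2]
      simp only [List.map_cons, List.map_nil, List.replicate_succ']
      rw [List.flatten_append, List.append_assoc, h3]
      simp
    · obtain ⟨h1, h2⟩ := pv_succ_part n choc.length hm h
      have hlt : n % choc.length < choc.length := Nat.mod_lt _ hm
      rw [h1, h2, List.append_assoc]
      congr 1
      rw [List.take_add_one]
      simp [List.getElem?_eq_getElem hlt]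

-- ===== VERDICT (by name: the statement is the Claim_ definition above) =====
theorem distribute_chocolates_iterative_spec : Claim_equal_distribute_chocolates_iterative := by
  intro choc students _ hpre
  unfold Spec_distribute_chocolates_iterative
  unfold distribute_chocolates_iterative distribute_chocolates_iterative_alt
  by_cases hs : students = []
  · subst hs; simp [PySem.List.pyRange_one_eq_nil]
  · have hc : choc ≠ [] := by
      rcases hpre with h | h
      · exact h
      · exact absurd h hs
    have hm : 0 < choc.length := List.length_pos_iff.mpr hc
    have key : ∀ k : Nat,
        PySem.List.pyGetD choc (PySem.Int.mod (0 + (k : Int)) (choc.length : Int)) 0 =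
          choc.getD (k % choc.length) 0 := by
      intro k
      rw [Int.zero_add, PySem.Int.mod_natCast, PySem.List.pyGetD_natCast]
    have hq : (PySem.Int.floordiv (students.length : Int) (choc.length : Int)).toNat =
        students.length / choc.length := by
      rw [PySem.Int.floordiv_natCast]; exact Int.toNat_natCast _
    have hr : PySem.Int.mod (students.length : Int) (choc.length : Int) =
        ((students.length % choc.length : Nat) : Int) := PySem.Int.mod_natCast _ _
    rw [if_neg hs, pv_foldl_append_map, PySem.List.pyRange_one]
    simp only [PySem.List.len_eq, Int.sub_zero, Int.toNat_natCast, List.map_map,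
      List.nil_append]
    rw [hq, hr, PySem.List.slice_to_natCast]
    have hmap : (List.range students.length).map
          ((fun i => PySem.List.pyGetD choc (PySem.Int.mod i (choc.length : Int)) 0) ∘
            (fun k : Nat => (0 : Int) + k)) =
        (List.range students.length).map (fun k => choc.getD (k % choc.length) 0) :=
      List.map_congr_left (fun k _ => key k)
    rw [hmap]
    exact pv_cyclic_eq_blocks choc hc students.length
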